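-- pv_equiv track=rewrite | github.com/adinashby-vanier-college/programming-in-science-lab-5-Mohammed1127 | Lab5.py | number_pattern
-- ===== SOURCE A (Python) =====
-- def number_pattern(n):
--     i = 1
--     result = ""
--     while i <= n:
--         j = 1
--         while j <= i:
--             result += str(j)
--             j += 1
--         if i != n:
--             result += "\n"
--         i += 1
--     return result
-- ===== SOURCE B (Python) =====
-- def number_pattern(n):
--     # incremental: each line is the previous line with str(i) appended
--     i = 1
--     line = ""
--     result = ""
--     while i <= n:
--         line += str(i)
--         result += line
--         if i != n:
--             result += "\n"
--         i += 1
--     return result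
-- ===== Notes on version B (the rewrite author's own statement) =====
-- stated objective: faster
-- what changed: Replaces A's nested digit-rebuilding loop with a single loop that maintains one running prefix string and appends str(i) to it once per line.
import Mathlib
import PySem

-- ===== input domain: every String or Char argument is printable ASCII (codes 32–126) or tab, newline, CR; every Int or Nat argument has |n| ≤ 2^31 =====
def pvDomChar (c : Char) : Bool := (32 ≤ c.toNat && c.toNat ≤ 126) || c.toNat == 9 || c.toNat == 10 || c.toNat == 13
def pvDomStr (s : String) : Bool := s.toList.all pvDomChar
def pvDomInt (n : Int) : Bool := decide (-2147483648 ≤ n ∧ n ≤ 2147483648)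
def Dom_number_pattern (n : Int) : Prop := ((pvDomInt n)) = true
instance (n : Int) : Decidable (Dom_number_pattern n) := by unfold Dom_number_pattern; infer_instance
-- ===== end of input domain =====

-- B builds each line incrementally from a running prefix string (one loop) instead of
-- A's nested loop rebuilding the digits 1..i for every line; return values proved equal for all n.

-- ===== PORT A =====
-- inner 'while j <= i' loop of A
def npA_inner (i j : Int) (res : String) : String :=
  if _h : j ≤ i then npA_inner i (j + 1) (res ++ PySem.Int.toStr j) else res
termination_by (i + 1 - j).toNat
decreasing_by omega

-- outer 'while i <= n' loop of A
def npA_outer (n i : Int) (res : String) : String :=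
  if _h : i ≤ n then
    npA_outer n (i + 1)
      (if i ≠ n then npA_inner i 1 res ++ "\n" else npA_inner i 1 res)
  else res
termination_by (n + 1 - i).toNat
decreasing_by omega

def number_pattern (n : Int) : String := npA_outer n 1 ""

-- ===== PORT B =====
-- single 'while i <= n' loop of B, carrying the running prefix `line`
def npB_loop (n i : Int) (line res : String) : String :=
  if _h : i ≤ n then
    npB_loop n (i + 1) (line ++ PySem.Int.toStr i)
      (if i ≠ n then res ++ (line ++ PySem.Int.toStr i) ++ "\n"
       else res ++ (line ++ PySem.Int.toStr i))
  else res
termination_by (n + 1 - i).toNat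
decreasing_by omega

def number_pattern_alt (n : Int) : String := npB_loop n 1 "" ""

-- ===== PRECONDITION & SPEC =====
def Spec_number_pattern (n : Int) (out : String) : Prop := out = number_pattern_alt n
instance (n : Int) (out : String) : Decidable (Spec_number_pattern n out) := by unfold Spec_number_pattern; infer_instance

-- ===== CLAIM (what is proved, stated in full; the proofs are below) =====
def Claim_equal_number_pattern : Prop := ∀ (n : Int), Dom_number_pattern n → Spec_number_pattern n (number_pattern n)

-- ===== LEMMAS AND PROOFS =====

-- A's inner loop only appends: factor out the accumulator
theorem npA_inner_homo (i : Int) : ∀ (k : Nat) (j : Int) (res : String),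
    (i + 1 - j).toNat ≤ k → npA_inner i j res = res ++ npA_inner i j "" := by
  intro k
  induction k with
  | zero =>
      intro j res h
      conv_lhs => rw [npA_inner]
      conv_rhs => rw [npA_inner]
      simp [show ¬ j ≤ i by omega]
  | succ k ih =>
      intro j res h
      conv_lhs => rw [npA_inner]
      conv_rhs => rw [npA_inner]
      by_cases hj : j ≤ i
      · simp only [hj, dite_true]
        rw [ih (j + 1) (res ++ PySem.Int.toStr j) (by omega),
            ih (j + 1) ("" ++ PySem.Int.toStr j) (by omega)]
        simp [String.append_assoc]
      · simp [hj]

-- one unrolling at the top: the last digit of the line for i is str(i)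
theorem npA_inner_self (j : Int) :
    npA_inner j j "" = npA_inner (j - 1) j "" ++ PySem.Int.toStr j := by
  conv_lhs => rw [npA_inner]
  conv_rhs => rw [npA_inner]
  simp only [le_refl, dite_true, show ¬ j ≤ j - 1 by omega, dite_false]
  conv_lhs => rw [npA_inner]
  simp [show ¬ j + 1 ≤ j by omega]

-- the line for i is the line for i-1 with str(i) appended
theorem npA_inner_snoc (i : Int) : ∀ (k : Nat) (j : Int),
    (i - j).toNat ≤ k → j ≤ i →
    npA_inner i j "" = npA_inner (i - 1) j "" ++ PySem.Int.toStr i := by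
  intro k
  induction k with
  | zero =>
      intro j hk hj
      have hji : j = i := by omega
      subst hji
      exact npA_inner_self j
  | succ k ih =>
      intro j hk hj
      by_cases hji : j ≤ i - 1
      · conv_lhs => rw [npA_inner]
        conv_rhs => rw [npA_inner]
        simp only [hj, hji, dite_true]
        rw [npA_inner_homo i ((i + 1 - (j + 1)).toNat) (j + 1) _ le_rfl,
            npA_inner_homo (i - 1) ((i - (j + 1)).toNat) (j + 1) _ (by omega),
            ih (j + 1) (by omega) (by omega)]
        simp [String.append_assoc]
      · have hji' : j = i := by omega
        subst hji'
        exact npA_inner_self j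

-- main invariant: A's outer loop equals B's loop when B carries the line for i-1
theorem np_loop_eq (n : Int) : ∀ (k : Nat) (i : Int) (res : String),
    (n + 1 - i).toNat ≤ k → 1 ≤ i →
    npA_outer n i res = npB_loop n i (npA_inner (i - 1) 1 "") res := by
  intro k
  induction k with
  | zero =>
      intro i res hk hi
      rw [npA_outer, npB_loop]
      simp [show ¬ i ≤ n by omega]
  | succ k ih =>
      intro i res hk hi
      conv_lhs => rw [npA_outer]
      conv_rhs => rw [npB_loop]
      by_cases h : i ≤ n
      · simp only [h, dite_true]
        rw [ih (i + 1) (if i ≠ n then npA_inner i 1 res ++ "\n" else npA_inner i 1 res)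
              (by omega) (by omega)]
        have h11 : i + 1 - 1 = i := by omega
        rw [h11]
        have hs : npA_inner i 1 "" = npA_inner (i - 1) 1 "" ++ PySem.Int.toStr i :=
          npA_inner_snoc i ((i - 1).toNat) 1 le_rfl (by omega)
        rw [← hs]
        rw [npA_inner_homo i ((i + 1 - 1).toNat) 1 res le_rfl]
      · simp [h]

-- ===== VERDICT (by name: the statement is the Claim_ definition above) =====
theorem number_pattern_spec : Claim_equal_number_pattern := by
  intro n _
  show number_pattern n = number_pattern_alt n
  unfold number_pattern number_pattern_alt
  rw [np_loop_eq n ((n + 1 - 1).toNat) 1 "" le_rfl le_rfl,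
      show (1 : Int) - 1 = 0 from rfl]
  conv_lhs => rw [npA_inner]
  simp
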